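-- pv_equiv track=rewrite | github.com/shinkeonkim/BOJ | 03000~03999/3900~3999/3986.py | is_good_word
-- ===== SOURCE A (Python) =====
-- def is_good_word(word: str) -> bool:
--   stack = []
--
--   for ch in word:
--     if stack and stack[-1] == ch:
--       stack.pop()
--     else:
--       stack.append(ch)
--
--   return not stack
-- ===== SOURCE B (Python) =====
-- def is_good_word(word: str) -> bool:
--     s = word
--     while True:
--         found = False
--         for i in range(len(s) - 1):
--             if s[i] == s[i + 1]:
--                 s = s[:i] + s[i + 2:]
--                 found = True
--                 break
--         if not found:
--             return not s
-- ===== Notes on version B (the rewrite author's own statement) =====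
-- stated objective: alternative
-- what changed: Replaces the single-pass stack with repeated string rewriting: scan for the first adjacent equal pair, splice it out, restart, and return whether the fully reduced string is empty (correct by confluence of adjacent-pair cancellation).
import Mathlib
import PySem

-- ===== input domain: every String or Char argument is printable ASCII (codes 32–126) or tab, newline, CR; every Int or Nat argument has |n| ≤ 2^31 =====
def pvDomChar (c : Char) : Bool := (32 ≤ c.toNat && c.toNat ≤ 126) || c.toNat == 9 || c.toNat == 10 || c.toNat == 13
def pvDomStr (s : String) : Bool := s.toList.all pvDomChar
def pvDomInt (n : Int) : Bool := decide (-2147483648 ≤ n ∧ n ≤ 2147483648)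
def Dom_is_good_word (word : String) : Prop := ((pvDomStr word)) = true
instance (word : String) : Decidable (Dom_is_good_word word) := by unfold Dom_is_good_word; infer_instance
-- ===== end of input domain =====

-- B rewrites the string by repeatedly splicing out the first adjacent equal pair instead of A's
-- single-pass stack; same return value (alternative decomposition, not faster).

-- ===== PORT A =====
-- the Python stack is kept head-as-top (head = Python stack[-1])
def pvStepA (stack : List Char) (ch : Char) : List Char :=
  if stack ≠ [] ∧ stack.head? = some ch then stack.tail else ch :: stack

def is_good_word (word : String) : Bool :=
  let stack := word.toList.foldl pvStepA []
  stack.isEmpty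

-- ===== PORT B =====
-- the inner for-loop of Source B: find the first i with s[i] = s[i+1] and splice the pair out
def pvSplice? : List Char → Option (List Char)
  | a :: b :: t => if a = b then some t else (pvSplice? (b :: t)).map (a :: ·)
  | _ => none

theorem pvSplice?_length : ∀ (l l' : List Char), pvSplice? l = some l' → l'.length < l.length := by
  intro l
  induction l with
  | nil => intro l' h; simp [pvSplice?] at h
  | cons a t ih =>
    intro l' h
    match t, h with
    | b :: u, h =>
      simp only [pvSplice?] at h
      split at h
      · cases h; simp
      · simp only [Option.map_eq_some_iff] at h
        obtain ⟨l'', hl'', rfl⟩ := h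
        have := ih l'' hl''
        simpa using Nat.succ_lt_succ this

-- the outer while-loop of Source B: repeat until no adjacent equal pair remains
def pvReduce (l : List Char) : List Char :=
  match h : pvSplice? l with
  | some l' => pvReduce l'
  | none => l
termination_by l.length
decreasing_by exact pvSplice?_length _ _ h

def is_good_word_alt (word : String) : Bool :=
  (pvReduce word.toList).isEmpty

-- ===== PRECONDITION & SPEC =====
def Spec_is_good_word (word : String) (out : Bool) : Prop := out = is_good_word_alt word
instance (word : String) (out : Bool) : Decidable (Spec_is_good_word word out) := by unfold Spec_is_good_word; infer_instance

-- ===== CLAIM (what is proved, stated in full; the proofs are below) =====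
def Claim_equal_is_good_word : Prop := ∀ (word : String), Dom_is_good_word word → Spec_is_good_word word (is_good_word word)

-- ===== LEMMAS AND PROOFS =====

-- A's stack never contains two equal adjacent elements
theorem pvStepA_chain (st : List Char) (c : Char) (h : st.IsChain (· ≠ ·)) :
    (pvStepA st c).IsChain (· ≠ ·) := by
  match st with
  | [] => exact List.isChain_singleton c
  | top :: rest =>
    by_cases hc : top = c
    · subst hc
      have : pvStepA (top :: rest) top = rest := by
        rw [pvStepA, if_pos ⟨by simp, by simp⟩]; rfl
      rw [this]
      exact (List.isChain_cons.mp h).2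
    · have : pvStepA (top :: rest) c = c :: top :: rest := by
        rw [pvStepA, if_neg]; simp [hc]
      rw [this]
      exact List.IsChain.cons_cons (fun hx => hc hx.symm) h

theorem pvFoldA_chain (l : List Char) : ∀ (st : List Char), st.IsChain (· ≠ ·) →
    (l.foldl pvStepA st).IsChain (· ≠ ·) := by
  induction l with
  | nil => intro st h; exact h
  | cons c t ih => intro st h; exact ih _ (pvStepA_chain st c h)

-- a pair of equal characters is a no-op on an irreducible stack
theorem pvStepA_cancel (st : List Char) (c : Char) (h : st.IsChain (· ≠ ·)) :
    pvStepA (pvStepA st c) c = st := by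
  match st with
  | [] =>
    have e1 : pvStepA [] c = [c] := by rw [pvStepA, if_neg]; simp
    have e2 : pvStepA [c] c = [] := by rw [pvStepA, if_pos ⟨by simp, by simp⟩]; rfl
    rw [e1, e2]
  | top :: rest =>
    by_cases hc : top = c
    · subst hc
      have e1 : pvStepA (top :: rest) top = rest := by
        rw [pvStepA, if_pos ⟨by simp, by simp⟩]; rfl
      rw [e1]
      match rest, h with
      | [], _ => rw [pvStepA, if_neg]; simp
      | d :: u, h =>
        have hd : top ≠ d := (List.isChain_cons.mp h).1 d rfl
        rw [pvStepA, if_neg]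
        rintro ⟨-, hx⟩
        simp only [List.head?_cons, Option.some.injEq] at hx
        exact hd hx.symm
    · have e1 : pvStepA (top :: rest) c = c :: top :: rest := by
        rw [pvStepA, if_neg]; simp [hc]
      have e2 : pvStepA (c :: top :: rest) c = top :: rest := by
        rw [pvStepA, if_pos ⟨by simp, by simp⟩]; rfl
      rw [e1, e2]

theorem pvFold_cancel (ys : List Char) (st : List Char) (c : Char) (h : st.IsChain (· ≠ ·)) :
    (c :: c :: ys).foldl pvStepA st = ys.foldl pvStepA st := by
  simp only [List.foldl_cons]
  rw [pvStepA_cancel st c h]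

-- pvSplice? characterisations
theorem pvSplice?_some : ∀ (l l' : List Char), pvSplice? l = some l' →
    ∃ xs c ys, l = xs ++ c :: c :: ys ∧ l' = xs ++ ys := by
  intro l
  induction l with
  | nil => intro l' h; simp [pvSplice?] at h
  | cons a t ih =>
    intro l' h
    cases t with
    | nil => simp [pvSplice?] at h
    | cons b u =>
      by_cases hab : a = b
      · rw [pvSplice?, if_pos hab] at h
        cases h
        exact ⟨[], a, l', by simp [hab], by simp⟩
      · rw [pvSplice?, if_neg hab] at h
        simp only [Option.map_eq_some_iff] at h
        obtain ⟨l'', hl'', rfl⟩ := h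
        obtain ⟨xs, c, ys, h1, h2⟩ := ih l'' hl''
        exact ⟨a :: xs, c, ys, by simp [h1], by simp [h2]⟩

theorem pvSplice?_none : ∀ (l : List Char), pvSplice? l = none → l.IsChain (· ≠ ·) := by
  intro l
  induction l with
  | nil => intro _; exact List.IsChain.nil
  | cons a t ih =>
    intro h
    cases t with
    | nil => exact List.isChain_singleton a
    | cons b u =>
      by_cases hab : a = b
      · rw [pvSplice?, if_pos hab] at h; cases h
      · rw [pvSplice?, if_neg hab] at h
        simp only [Option.map_eq_none_iff] at h
        exact List.IsChain.cons_cons hab (ih h)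

-- an irreducible word passes through the stack unchanged (reversed)
theorem pvFold_irr : ∀ (l st : List Char), l.IsChain (· ≠ ·) →
    (∀ c, l.head? = some c → st.head? ≠ some c) →
    l.foldl pvStepA st = l.reverse ++ st := by
  intro l
  induction l with
  | nil => intro st _ _; simp
  | cons a t ih =>
    intro st hch hhd
    have hna : ¬((st ≠ []) ∧ st.head? = some a) := by
      intro ⟨_, h2⟩; exact hhd a rfl h2
    obtain ⟨h1, h2⟩ := List.isChain_cons.mp hch
    simp only [List.foldl_cons, pvStepA, if_neg hna]
    have := ih (a :: st) h2 (by
      intro c hc hx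
      simp only [List.head?_cons, Option.some.injEq] at hx
      exact h1 c hc hx)
    rw [this]; simp

theorem pvReduce_eq_some (l l' : List Char) (h : pvSplice? l = some l') :
    pvReduce l = pvReduce l' := by
  rw [pvReduce]
  split
  · rename_i l'' h2; rw [h] at h2; cases h2; rfl
  · rename_i h2; rw [h] at h2; cases h2

theorem pvReduce_eq_none (l : List Char) (h : pvSplice? l = none) : pvReduce l = l := by
  rw [pvReduce]
  split
  · rename_i l'' h2; rw [h] at h2; cases h2
  · rfl

-- main: the stack fold and the repeated rewriting agree on emptiness
theorem pvMain : ∀ (n : ℕ) (l : List Char), l.length ≤ n →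
    (l.foldl pvStepA []).isEmpty = (pvReduce l).isEmpty := by
  intro n
  induction n with
  | zero =>
    intro l h
    have : l = [] := List.eq_nil_of_length_eq_zero (Nat.le_zero.mp h)
    subst this
    simp [pvReduce, pvSplice?]
  | succ n ih =>
    intro l hlen
    cases hs : pvSplice? l with
    | some l' =>
      obtain ⟨xs, c, ys, rfl, rfl⟩ := pvSplice?_some l l' hs
      have hch : (xs.foldl pvStepA []).IsChain (· ≠ ·) := pvFoldA_chain xs [] List.IsChain.nil
      have hfold : ((xs ++ c :: c :: ys).foldl pvStepA ([] : List Char))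
          = (xs ++ ys).foldl pvStepA [] := by
        rw [List.foldl_append, List.foldl_append, pvFold_cancel ys _ c hch]
      rw [hfold, pvReduce_eq_some _ _ hs]
      apply ih
      have := pvSplice?_length _ _ hs
      omega
    | none =>
      rw [pvReduce_eq_none l hs]
      rw [pvFold_irr l [] (pvSplice?_none l hs) (by simp)]
      simp

-- ===== VERDICT (by name: the statement is the Claim_ definition above) =====
theorem is_good_word_spec : Claim_equal_is_good_word := by
  intro word _
  unfold Spec_is_good_word is_good_word is_good_word_alt
  exact pvMain word.toList.length word.toList le_rfl
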